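-- pv_equiv track=rewrite | github.com/mightya4/time_conversion | hackerrank_time_conversion.py | timeConversion
-- ===== SOURCE A (Python) =====
-- def timeConversion(s):
--     # Write your code here
--     time_constraint = ''.join([i for i in s if i.isalpha()])
--     curr_time = ''.join([i for i in s if not i.isalpha()])
--     if time_constraint == "PM":
--         #add 12 plus current time
--         if curr_time[0] == "1" and curr_time[1] == "2":
--             pass
--         else:
--             tmp_time = list(curr_time)
--             afternoon = 12
--             tmp_num = afternoon + int(tmp_time[0] + tmp_time[1])
--             tmp_time[0], tmp_time[1] = str(tmp_num)
--             curr_time = "".join(tmp_time)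
--     else:
--         #check if time is 12 am
--         if curr_time[0] == "1" and curr_time[1] == "2":
--             tmp_time = list(curr_time)
--             tmp_time[0] = "0"
--             tmp_time[1] = "0"
--             curr_time = "".join(tmp_time)
--         else:
--             pass
--
--     return curr_time
-- ===== SOURCE B (Python) =====
-- def timeConversion(s):
--     letters = ''.join(filter(str.isalpha, s))
--     rest = ''.join(c for c in s if not c.isalpha())
--     pm = letters == "PM"
--     if pm or rest[:2] == "12":
--         return "%02d" % (int(rest[:2]) % 12 + 12 * pm) + rest[2:]
--     return rest
-- ===== Notes on version B (the rewrite author's own statement) =====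
-- stated objective: simpler
-- what changed: B replaces A's four-way branch tree (is the hour twelve, is the period PM) with char-list surgery (list, tuple-unpack assignment into slots 0 and 1, re-join) by one modular closed form: every changed hour is the parsed two-char hour mod 12, plus 12 when PM, rendered by a single zero-padded format under a single guard; unchanged times are returned as-is.
-- outside the precondition, e.g. on timeConversion('25:00:00PM'): A returns '37:00:00', B returns '13:00:00'; on timeConversion('-1:11:11PM'): A returns '11:11:11', B returns '23:11:11'
import Mathlib
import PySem

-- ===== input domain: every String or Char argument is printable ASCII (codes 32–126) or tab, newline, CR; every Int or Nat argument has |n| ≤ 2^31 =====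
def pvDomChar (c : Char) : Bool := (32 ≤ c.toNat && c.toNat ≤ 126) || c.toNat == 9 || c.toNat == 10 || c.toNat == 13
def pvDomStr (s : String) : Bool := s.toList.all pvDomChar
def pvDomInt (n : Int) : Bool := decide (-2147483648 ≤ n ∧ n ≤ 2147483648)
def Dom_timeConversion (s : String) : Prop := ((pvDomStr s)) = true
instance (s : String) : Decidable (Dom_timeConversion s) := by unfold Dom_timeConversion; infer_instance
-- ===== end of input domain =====

-- B replaces A's explicit 'is it 12?' branch tree and char-list surgery by ONE
-- modular closed form: hour' = hour % 12 + 12*pm, zero-padded (objective: simpler).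

-- Python's str.isalpha per character; exact on Dom's ASCII characters.
def pyAlpha (c : Char) : Bool := ('A' ≤ c && c ≤ 'Z') || ('a' ≤ c && c ≤ 'z')

-- ===== PORT A =====
def timeConversion (s : String) : String :=
  let tc : List Char := s.toList.filter (fun c => pyAlpha c)      -- time_constraint
  let ct : List Char := s.toList.filter (fun c => !pyAlpha c)    -- curr_time
  if String.ofList tc = "PM" then
    if (PySem.List.pyGet? ct 0 == some '1') && (PySem.List.pyGet? ct 1 == some '2') then
      String.ofList ct
    else
      -- tmp_num = 12 + int(tmp_time[0] + tmp_time[1]); tmp_time[0], tmp_time[1] = str(tmp_num)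
      match PySem.List.pyGet? ct 0, PySem.List.pyGet? ct 1 with
      | some a, some b =>
        match PySem.Int.ofChars? [a, b] with
        | some n =>
          match PySem.Int.toChars (12 + n) with
          | [x, y] => String.ofList (x :: y :: ct.drop 2)
          | _ => ""           -- unpacking ValueError: Python A raises here (outside Pre_)
        | none => ""          -- int() ValueError: Python A raises here (outside Pre_)
      | _, _ => ""            -- IndexError: Python A raises here (outside Pre_)
  else
    if (PySem.List.pyGet? ct 0 == some '1') && (PySem.List.pyGet? ct 1 == some '2') then
      String.ofList ('0' :: '0' :: ct.drop 2)
    else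
      match PySem.List.pyGet? ct 0 with
      | some _ => String.ofList ct
      | none => ""            -- IndexError on curr_time[0]: Python A raises here (outside Pre_)

-- ===== PORT B =====
-- "%02d" % m : str(m) left-padded with '0' to width 2 (exact for every Int).
def pad2 (m : Int) : List Char :=
  let cs := PySem.Int.toChars m
  if cs.length = 1 then '0' :: cs else cs

def timeConversion_alt (s : String) : String :=
  let letters : List Char := s.toList.filter (fun c => pyAlpha c)
  let rest : List Char := s.toList.filter (fun c => !pyAlpha c)
  let pm : Bool := String.ofList letters == "PM"
  if pm || rest.take 2 == ['1', '2'] then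
    match PySem.Int.ofChars? (rest.take 2) with
    | some n =>
        String.ofList (pad2 (PySem.Int.mod n 12 + 12 * (if pm then 1 else 0)) ++ rest.drop 2)
    | none => ""              -- int() ValueError: Python B raises here (outside Pre_)
  else String.ofList rest

-- ===== PRECONDITION & SPEC =====
-- Pre_ is the set of inputs on which A returns, MINUS the PM strings whose two leading
-- non-alpha characters parse to an hour outside 0..12: there A still returns (its '12+hour'
-- arithmetic spills past two digits of meaning on garbage hours, e.g. '25:00:00PM' → '37:00:00')
-- while B's modular form wraps the hour — a corner outside the 12-hour-clock domain, excluded and cited.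
-- Elsewhere (too-short curr_time, unparsable PM hour) Python A raises IndexError/ValueError.
def Pre_timeConversion (s : String) : Prop :=
  let tc : List Char := s.toList.filter (fun c => pyAlpha c)
  let ct : List Char := s.toList.filter (fun c => !pyAlpha c)
  if String.ofList tc = "PM" then
    2 ≤ ct.length ∧
      (ct.take 2 = ['1', '2'] ∨
        ((PySem.Int.ofChars? (ct.take 2)).isSome = true ∧
          0 ≤ (PySem.Int.ofChars? (ct.take 2)).getD 0 ∧
          (PySem.Int.ofChars? (ct.take 2)).getD 0 ≤ 11))
  else
    ct ≠ [] ∧ (ct.take 1 = ['1'] → 2 ≤ ct.length)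
instance (s : String) : Decidable (Pre_timeConversion s) := by unfold Pre_timeConversion; infer_instance

def pvWitness_timeConversion : String := "07:05:45PM"

def Spec_timeConversion (s : String) (out : String) : Prop := out = timeConversion_alt s
instance (s : String) (out : String) : Decidable (Spec_timeConversion s out) := by unfold Spec_timeConversion; infer_instance

-- ===== CLAIM (what is proved, stated in full; the proofs are below) =====
def Claim_equal_timeConversion : Prop := ∀ (s : String), Dom_timeConversion s → Pre_timeConversion s → Spec_timeConversion s (timeConversion s)

-- ===== LEMMAS AND PROOFS =====

-- A's short-circuited "ct[0] == '1' and ct[1] == '2'" is B's slice test ct[:2] == "12".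
lemma get01_iff (ct : List Char) :
    ((PySem.List.pyGet? ct 0 == some '1') && (PySem.List.pyGet? ct 1 == some '2')) = true
      ↔ ct.take 2 = ['1', '2'] := by
  match ct with
  | [] => simp [PySem.List.pyGet?, PySem.List.pyIdx?]
  | [a] => simp [PySem.List.pyGet?, PySem.List.pyIdx?]
  | a :: b :: t => simp

lemma pyGet0 (a : Char) (t : List Char) : PySem.List.pyGet? (a :: t) 0 = some a :=
  PySem.List.pyGet?_zero_cons a t

lemma pyGet1 (a b : Char) (t : List Char) : PySem.List.pyGet? (a :: b :: t) 1 = some b := by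
  rw [show (1 : Int) = ((1 : Nat) : Int) from rfl, PySem.List.pyGet?_natCast]
  rfl

-- For the admitted PM hours n (0..11), str(12+n) is two characters and equals
-- B's zero-padded modular hour, and the '12' prefix is the fixed point of the form.
lemma pm_hour_eq (n : Int) (h0 : 0 ≤ n) (h1 : n ≤ 11) :
    pad2 (n % 12 + 12) = PySem.Int.toChars (12 + n) := by
  interval_cases n <;> decide

lemma toChars_len2 (m : Int) (h1 : 10 ≤ m) (h2 : m ≤ 99) :
    (PySem.Int.toChars m).length = 2 := by
  interval_cases m <;> decide

-- ===== VERDICT (by name: the statement is the Claim_ definition above) =====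
theorem timeConversion_spec : Claim_equal_timeConversion := by
  intro s _ pre
  unfold Spec_timeConversion timeConversion timeConversion_alt
  unfold Pre_timeConversion at pre
  set tc : List Char := s.toList.filter (fun c => pyAlpha c) with htc
  set ct : List Char := s.toList.filter (fun c => !pyAlpha c) with hct
  by_cases hpm : String.ofList tc = "PM"
  · have hpmb : (String.ofList tc == "PM") = true := by simp [hpm]
    rw [if_pos hpm] at pre
    obtain ⟨hlen, hcase⟩ := pre
    match hc : ct, hlen, hcase with
    | a :: b :: t, _, hcase =>
      by_cases h12 : (a :: b :: t).take 2 = ['1', '2']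
      · obtain ⟨rfl, rfl⟩ : a = '1' ∧ b = '2' := by simpa using h12
        rw [if_pos hpm, if_pos ((get01_iff _).mpr h12)]
        simp only [hpmb, Bool.true_or, if_true, List.take_succ_cons, List.take_zero,
          mul_one]
        rw [show PySem.Int.ofChars? ['1', '2'] = some 12 from by decide]
        show String.ofList ('1' :: '2' :: t)
          = String.ofList (pad2 (PySem.Int.mod 12 12 + 12) ++ List.drop 2 ('1' :: '2' :: t))
        rw [show pad2 (PySem.Int.mod 12 12 + 12) = ['1', '2'] from by decide]
        rfl
      · rw [if_pos hpm, if_neg (by rw [get01_iff]; exact h12)]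
        rcases hcase with h | ⟨hs, hlo, hhi⟩
        · exact absurd h h12
        have htk : (a :: b :: t).take 2 = [a, b] := rfl
        rw [htk] at hs hlo hhi
        obtain ⟨n, hn⟩ := Option.isSome_iff_exists.mp hs
        rw [hn] at hlo hhi
        simp only [Option.getD_some] at hlo hhi
        have hl2 : (PySem.Int.toChars (12 + n)).length = 2 :=
          toChars_len2 _ (by omega) (by omega)
        have hmod : PySem.Int.mod n 12 = n % 12 :=
          PySem.Int.mod_eq_emod_of_pos (by norm_num)
        rw [pyGet0, pyGet1]
        simp only [hpmb, Bool.true_or, if_true, htk, hn, mul_one, hmod,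
          pm_hour_eq n hlo hhi, List.drop_succ_cons, List.drop_zero]
        match hd : PySem.Int.toChars (12 + n), hl2 with
        | [x, y], _ => rfl
  · have hpmb : (String.ofList tc == "PM") = false := by simp [hpm]
    rw [if_neg hpm] at pre
    obtain ⟨hne, h1⟩ := pre
    by_cases h12 : ct.take 2 = ['1', '2']
    · rw [if_neg hpm, if_pos ((get01_iff ct).mpr h12)]
      have hbeq : (ct.take 2 == ['1', '2']) = true := by simp [h12]
      simp only [hpmb, Bool.false_or, hbeq, if_true, h12]
      rw [show PySem.Int.ofChars? ['1', '2'] = some 12 from by decide]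
      show String.ofList ('0' :: '0' :: List.drop 2 ct)
        = String.ofList (pad2 (PySem.Int.mod 12 12 + 12 * if false = true then 1 else 0)
            ++ List.drop 2 ct)
      rw [show pad2 (PySem.Int.mod 12 12 + 12 * if false = true then 1 else 0) = ['0', '0']
        from by decide]
      rfl
    · rw [if_neg hpm, if_neg (by rw [get01_iff]; exact h12)]
      have hbeq : (ct.take 2 == ['1', '2']) = false := by simp [h12]
      simp only [hpmb, Bool.false_or, hbeq, if_false]
      match hc : ct, hne with
      | a :: t, _ => rw [pyGet0]; rfl
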